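-- pv_equiv track=rewrite | github.com/tsmorrill/Sweepings | python3/self_sim_base_3.py | self_sim
-- ===== SOURCE A (Python) =====
-- def self_sim(iter=1):
--     pattern = [2, 0, 1]
--     old_list = pattern.copy()
--     for _ in range(iter):
--         new_list = []
--         for val in old_list:
--             new_list.extend([3*val]*3)
--         new_list = [val + pattern[i % 3] for i, val in enumerate(new_list)]
--         old_list = new_list
--     return old_list
-- ===== SOURCE B (Python) =====
-- def self_sim(iter=1):
--     pattern = [2, 0, 1]
--     steps = iter if iter > 0 else 0
--     return [sum(pattern[(n // 3**j) % 3] * 3**j for j in range(steps + 1))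
--             for n in range(3**(steps + 1))]
-- ===== Notes on version B (the rewrite author's own statement) =====
-- stated objective: simpler
-- what changed: Replaces the iterative whole-list expansion (rebuild the list iter times by tripling each value and adding the pattern) with a closed-form per-index formula: each output element is computed directly from its index by base-3 digit substitution d -> pattern[d].
import Mathlib
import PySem

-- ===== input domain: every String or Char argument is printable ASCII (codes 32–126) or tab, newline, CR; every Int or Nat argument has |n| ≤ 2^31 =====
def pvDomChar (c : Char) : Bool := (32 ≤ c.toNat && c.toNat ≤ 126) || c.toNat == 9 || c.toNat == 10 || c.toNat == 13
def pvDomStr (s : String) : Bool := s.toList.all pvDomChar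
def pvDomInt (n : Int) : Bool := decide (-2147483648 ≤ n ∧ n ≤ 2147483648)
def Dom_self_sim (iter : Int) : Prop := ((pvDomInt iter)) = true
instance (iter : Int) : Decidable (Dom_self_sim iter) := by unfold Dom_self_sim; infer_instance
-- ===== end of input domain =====

-- B replaces A's repeated whole-list expansion by a closed-form per-index base-3
-- digit-substitution formula (objective: simpler/alternative).

-- ===== PORT A =====
-- the body of A's outer loop: extend with tripled values, then add pattern[i % 3]
-- (pattern[i % 3] never raises in Python since 0 ≤ i % 3 < 3; pyGetD is exact there)
def stepA (pattern : List Int) (old : List Int) : List Int :=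
  let new1 := old.foldl (fun acc val => acc ++ [3*val, 3*val, 3*val]) []
  (PySem.List.enumerate new1 0).map
    (fun p => p.2 + PySem.List.pyGetD pattern (PySem.Int.mod p.1 3) 0)

def self_sim (iter : Int) : List Int :=
  let pattern : List Int := [2, 0, 1]
  (PySem.List.pyRange 0 iter 1).foldl (fun old _ => stepA pattern old) pattern

-- ===== PORT B =====
def self_sim_alt (iter : Int) : List Int :=
  let pattern : List Int := [2, 0, 1]
  let steps : Int := if iter > 0 then iter else 0
  (PySem.List.pyRange 0 (3 ^ (steps + 1).toNat) 1).map (fun n =>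
    (PySem.List.pyRange 0 (steps + 1) 1).foldl
      (fun s j =>
        s + PySem.List.pyGetD pattern
              (PySem.Int.mod (PySem.Int.floordiv n (3 ^ j.toNat)) 3) 0 * 3 ^ j.toNat)
      0)

-- ===== PRECONDITION & SPEC =====
def Spec_self_sim (iter : Int) (out : List Int) : Prop := out = self_sim_alt iter
instance (iter : Int) (out : List Int) : Decidable (Spec_self_sim iter out) := by unfold Spec_self_sim; infer_instance

-- ===== CLAIM (what is proved, stated in full; the proofs are below) =====
def Claim_equal_self_sim : Prop := ∀ (iter : Int), Dom_self_sim iter → Spec_self_sim iter (self_sim iter)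

-- ===== LEMMAS AND PROOFS =====

-- pattern[r] (as B reads it)
def pat (r : Nat) : Int := PySem.List.pyGetD [2, 0, 1] (r : Int) 0

-- B's closed-form value at index n after k substitution rounds
def gB (k n : Nat) : Int :=
  ((List.range (k + 1)).map (fun j => pat (n / 3 ^ j % 3) * (3 : Int) ^ j)).sum

theorem foldl_const_iterate {α β : Type} (g : β → β) (l : List α) (init : β) :
    l.foldl (fun s _ => g s) init = g^[l.length] init := by
  induction l generalizing init with
  | nil => rfl
  | cons a t ih => simp [List.foldl_cons, ih, Function.iterate_succ_apply]

theorem flatMap_tri_length (l : List Int) :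
    (l.flatMap fun v => [3*v, 3*v, 3*v]).length = 3 * l.length := by
  induction l with
  | nil => rfl
  | cons v t ih =>
    simp only [List.flatMap_cons, List.length_append, List.length_cons, List.length_nil, ih]
    omega

theorem flatMap_tri_getD (l : List Int) (i : Nat) (h : i < 3 * l.length) :
    (l.flatMap fun v => [3*v, 3*v, 3*v]).getD i 0 = 3 * l.getD (i / 3) 0 := by
  induction l generalizing i with
  | nil => simp at h
  | cons v t ih =>
    match i with
    | 0 => rfl
    | 1 => rfl
    | 2 => rfl
    | (j+3) =>
      have hj : j < 3 * t.length := by simp at h; omega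
      have h3 : (j + 3) / 3 = j / 3 + 1 := by omega
      simp only [List.flatMap_cons]
      show (t.flatMap fun v => [3*v, 3*v, 3*v]).getD j 0 = _
      rw [ih j hj, h3, List.getD_cons_succ]

theorem stepA_map_range (f : Nat → Int) (N : Nat) :
    stepA [2, 0, 1] ((List.range N).map f) =
      (List.range (3 * N)).map (fun i => 3 * f (i / 3) + pat (i % 3)) := by
  unfold stepA
  dsimp only
  rw [PySem.List.foldl_append_eq_flatMap, PySem.List.enumerate_eq_map_pyRange _ 0]
  simp only [List.nil_append, List.map_map, PySem.List.len_eq, PySem.List.pyRange_zero,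
    Int.toNat_natCast, flatMap_tri_length, List.length_map, List.length_range]
  apply List.map_congr_left
  intro i hi
  have hi' : i < 3 * N := List.mem_range.mp hi
  simp only [Function.comp_apply]
  have hm : PySem.Int.mod (↑i) 3 = ((i % 3 : Nat) : Int) := by
    rw [show (3 : Int) = ((3 : Nat) : Int) from by norm_num, PySem.Int.mod_natCast]
  rw [hm, PySem.List.pyGetD_natCast,
    flatMap_tri_getD _ i (by simpa using hi'),
    PySem.List.getD_map_range f N (i / 3) 0 (by omega)]
  rfl

theorem gB_succ (k n : Nat) : gB (k + 1) n = pat (n % 3) + 3 * gB k (n / 3) := by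
  unfold gB
  rw [List.range_succ_eq_map]
  simp only [List.map_cons, List.map_map, List.sum_cons, pow_zero, mul_one, Nat.div_one]
  rw [← List.sum_map_mul_left]
  refine congrArg (pat (n % 3) + ·) (congrArg List.sum (List.map_congr_left ?_))
  intro j _
  simp only [Function.comp_apply, Nat.succ_eq_add_one]
  have h1 : n / 3 ^ (j + 1) = n / 3 / 3 ^ j := by
    rw [Nat.div_div_eq_div_mul, ← pow_succ']
  rw [h1, pow_succ]
  ring

theorem iterate_eq_map_gB (k : Nat) :
    (stepA [2, 0, 1])^[k] [2, 0, 1] = (List.range (3 ^ (k + 1))).map (gB k) := by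
  induction k with
  | zero => decide
  | succ k ih =>
    rw [Function.iterate_succ_apply', ih, stepA_map_range]
    have h3 : 3 * 3 ^ (k + 1) = 3 ^ (k + 1 + 1) := by ring
    rw [h3]
    apply List.map_congr_left
    intro i _
    rw [gB_succ]
    ring

theorem self_sim_eq_iterate (iter : Int) :
    self_sim iter = (stepA [2, 0, 1])^[iter.toNat] [2, 0, 1] := by
  unfold self_sim
  dsimp only
  rw [foldl_const_iterate (stepA [2, 0, 1]), PySem.List.length_pyRange_one]
  norm_num

theorem trit_cast (n j : Nat) :
    PySem.Int.mod (PySem.Int.floordiv (↑n) ((3 : Int) ^ j)) 3 = ↑(n / 3 ^ j % 3) := by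
  have h3 : (3 : Int) = ((3 : Nat) : Int) := by norm_num
  rw [show ((3 : Int) ^ j) = ((3 ^ j : Nat) : Int) by push_cast; ring,
    PySem.Int.floordiv_natCast, h3, PySem.Int.mod_natCast]

theorem alt_eq (iter : Int) :
    self_sim_alt iter = (List.range (3 ^ (iter.toNat + 1))).map (gB iter.toNat) := by
  unfold self_sim_alt
  dsimp only
  by_cases h : iter > 0
  · rw [if_pos h]
    obtain ⟨m, hm⟩ : ∃ m : Nat, iter = ↑m := ⟨iter.toNat, (Int.toNat_of_nonneg h.le).symm⟩
    subst hm
    have hc : (m : Int) + 1 = ((m + 1 : Nat) : Int) := by push_cast; ring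
    rw [hc]
    simp only [Int.toNat_natCast]
    rw [show ((3 : Int) ^ (m + 1)) = ((3 ^ (m + 1) : Nat) : Int) by push_cast; ring]
    rw [PySem.List.pyRange_zero_nat, PySem.List.pyRange_zero_nat, List.map_map]
    apply List.map_congr_left
    intro n _
    simp only [Function.comp_apply]
    rw [List.foldl_map, PySem.List.foldl_add]
    unfold gB
    simp only [zero_add]
    refine congrArg List.sum (List.map_congr_left ?_)
    intro j _
    simp only [Int.toNat_natCast]
    rw [trit_cast]
    rfl
  · rw [if_neg h]
    rw [Int.toNat_of_nonpos (not_lt.mp h)]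
    decide

-- ===== VERDICT (by name: the statement is the Claim_ definition above) =====
theorem self_sim_spec : Claim_equal_self_sim := by
  intro iter _
  unfold Spec_self_sim
  rw [self_sim_eq_iterate, iterate_eq_map_gB, alt_eq]
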